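-- pv_equiv track=rewrite | github.com/nikitaminiaev/Assembler | controller/core_logic/lapshin_algorithm/service/recognition/lapshin_feature_recognizer.py | __gen_bypass_point
-- ===== SOURCE A (Python) =====
-- from typing import Tuple, Iterator
--
-- def __gen_bypass_point(point: Tuple[int, int]):
--     """
--         обход 8-ми точек против часовой от стартовой
--     """
--     x = point[0]
--     y = point[1]
--     y += 1
--     yield x, y
--     x -= 1
--     yield x, y
--     for _ in range(2):
--         y -= 1
--         yield x, y
--     for _ in range(2):
--         x += 1
--         yield x, y
--     for _ in range(2):
--         y += 1
--         yield x, y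
--     yield x - 1, y
-- ===== SOURCE B (Python) =====
-- def __gen_bypass_point(point):
--     # Generate the ring by starting with direction (0,1) and rotating it 45
--     # degrees counterclockwise eight times: (dx,dy) -> (dx-dy, dx+dy) clamped
--     # to [-1,1] stays on the 8-neighbour ring; the 9th yield closes the loop.
--     x, y = point
--     dx, dy = 0, 1
--     yield x + dx, y + dy
--     for _ in range(8):
--         dx, dy = max(-1, min(1, dx - dy)), max(-1, min(1, dx + dy))
--         yield x + dx, y + dy
-- ===== Notes on version B (the rewrite author's own statement) =====
-- stated objective: alternative
-- what changed: B derives each neighbour by rotating a single direction vector 45 degrees counterclockwise ((dx,dy)->(dx-dy,dx+dy) clamped to the ring) eight times, instead of A's four staged passes that mutate x and y by phase.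
import Mathlib
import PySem

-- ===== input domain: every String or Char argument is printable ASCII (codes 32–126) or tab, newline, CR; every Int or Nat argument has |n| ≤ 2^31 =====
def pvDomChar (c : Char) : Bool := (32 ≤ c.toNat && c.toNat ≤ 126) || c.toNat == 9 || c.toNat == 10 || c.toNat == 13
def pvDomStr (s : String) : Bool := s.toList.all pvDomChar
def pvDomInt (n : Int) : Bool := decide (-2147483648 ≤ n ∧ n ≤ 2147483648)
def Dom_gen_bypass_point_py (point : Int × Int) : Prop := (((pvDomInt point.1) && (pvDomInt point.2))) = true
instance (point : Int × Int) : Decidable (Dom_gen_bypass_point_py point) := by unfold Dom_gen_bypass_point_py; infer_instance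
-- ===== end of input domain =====

-- B generates the ring by rotating one direction vector 45° CCW eight times (clamped), instead of A's staged x/y mutations; same output list.

-- ===== PORT A =====
-- Literal transliteration: the generator's yields collected in order; the two-step
-- 'for _ in range(2)' loops are ported as folds over range(2) threading (cursor, acc).
def gen_bypass_point_py (point : Int × Int) : List (Int × Int) :=
  let x := point.1
  let y := point.2
  let y := y + 1
  let acc : List (Int × Int) := [(x, y)]
  let x := x - 1
  let acc := acc ++ [(x, y)]
  let (y, acc) := (PySem.List.pyRange 0 2 1).foldl
    (fun (st : Int × List (Int × Int)) _ =>
      let y := st.1 - 1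
      (y, st.2 ++ [(x, y)])) (y, acc)
  let (x, acc) := (PySem.List.pyRange 0 2 1).foldl
    (fun (st : Int × List (Int × Int)) _ =>
      let x := st.1 + 1
      (x, st.2 ++ [(x, y)])) (x, acc)
  let (y, acc) := (PySem.List.pyRange 0 2 1).foldl
    (fun (st : Int × List (Int × Int)) _ =>
      let y := st.1 + 1
      (y, st.2 ++ [(x, y)])) (y, acc)
  acc ++ [(x - 1, y)]

-- ===== PORT B =====
-- clamp to [-1,1] = Python max(-1, min(1, v))
def pvClamp (v : Int) : Int := max (-1) (min 1 v)

def gen_bypass_point_py_alt (point : Int × Int) : List (Int × Int) :=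
  let x := point.1
  let y := point.2
  let d : Int × Int := (0, 1)
  let acc : List (Int × Int) := [(x + d.1, y + d.2)]
  let (_, acc) := (PySem.List.pyRange 0 8 1).foldl
    (fun (st : (Int × Int) × List (Int × Int)) _ =>
      let d := (pvClamp (st.1.1 - st.1.2), pvClamp (st.1.1 + st.1.2))
      (d, st.2 ++ [(x + d.1, y + d.2)])) (d, acc)
  acc

-- ===== PRECONDITION & SPEC =====
def Spec_gen_bypass_point_py (point : Int × Int) (out : List (Int × Int)) : Prop := out = gen_bypass_point_py_alt point
instance (point : Int × Int) (out : List (Int × Int)) : Decidable (Spec_gen_bypass_point_py point out) := by unfold Spec_gen_bypass_point_py; infer_instance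

-- ===== CLAIM =====
def Claim_equal_gen_bypass_point_py : Prop := ∀ (point : Int × Int), Dom_gen_bypass_point_py point → Spec_gen_bypass_point_py point (gen_bypass_point_py point)

-- ===== LEMMAS AND PROOFS =====

-- ===== VERDICT =====
theorem gen_bypass_point_py_spec : Claim_equal_gen_bypass_point_py := by
  intro ⟨x, y⟩ _
  show _ = _
  simp [gen_bypass_point_py, gen_bypass_point_py_alt, pvClamp, PySem.List.pyRange,
    List.range_succ]
  constructor <;> ring
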